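-- pv_equiv track=rewrite | github.com/didier1969/axon | scripts/qualify_mcp.py | combine_verdicts
-- ===== SOURCE A (Python) =====
-- def combine_verdicts(statuses: list[str]) -> str:
--     relevant = [status for status in statuses if status != "skip"]
--     if not relevant:
--         return "skip"
--     if any(status == "fail" for status in relevant):
--         return "fail"
--     if any(status == "warn" for status in relevant):
--         return "warn"
--     return "ok"
-- ===== SOURCE B (Python) =====
-- _PRIORITY = {"fail": 3, "warn": 2, "skip": 0}
-- _LABEL = {0: "skip", 1: "ok", 2: "warn", 3: "fail"}
--
--
-- def combine_verdicts(statuses: list[str]) -> str: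
--     best = 0
--     for status in statuses:
--         best = max(best, _PRIORITY.get(status, 1))
--     return _LABEL[best]
-- ===== Notes on version B (the rewrite author's own statement) =====
-- stated objective: alternative
-- what changed: Replaced the filter-then-three-any-scans with a single pass that folds each status into a running maximum priority rank (fail=3, warn=2, other=1, skip=0) and decodes the final rank to a label.
import Mathlib
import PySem

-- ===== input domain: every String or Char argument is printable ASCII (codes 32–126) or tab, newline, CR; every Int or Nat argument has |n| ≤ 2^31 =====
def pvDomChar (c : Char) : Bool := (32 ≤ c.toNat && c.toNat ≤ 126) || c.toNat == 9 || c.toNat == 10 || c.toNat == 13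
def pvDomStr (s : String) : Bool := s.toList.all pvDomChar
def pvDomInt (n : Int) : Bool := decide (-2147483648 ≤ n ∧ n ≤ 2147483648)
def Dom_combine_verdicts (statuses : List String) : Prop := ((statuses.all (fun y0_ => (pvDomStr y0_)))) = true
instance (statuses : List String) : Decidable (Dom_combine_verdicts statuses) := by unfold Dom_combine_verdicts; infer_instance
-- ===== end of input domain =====

-- B replaces A's filter plus three any-scans by one fold keeping the maximum priority rank, decoded to a label at the end (alternative decomposition, same cost).


-- ===== PORT A =====
def combine_verdicts (statuses : List String) : String :=
  let relevant := statuses.filter (fun status => status ≠ "skip")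
  if relevant = [] then "skip"
  else if relevant.any (fun status => status == "fail") then "fail"
  else if relevant.any (fun status => status == "warn") then "warn"
  else "ok"

-- ===== PORT B =====
-- _PRIORITY.get(status, 1)
def pvRank (s : String) : Nat :=
  if s = "fail" then 3 else if s = "warn" then 2 else if s = "skip" then 0 else 1

def combine_verdicts_alt (statuses : List String) : String :=
  let best := statuses.foldl (fun b s => max b (pvRank s)) 0
  -- _LABEL[best]
  if best = 0 then "skip" else if best = 1 then "ok" else if best = 2 then "warn" else "fail"

-- ===== PRECONDITION & SPEC =====
def Spec_combine_verdicts (statuses : List String) (out : String) : Prop := out = combine_verdicts_alt statuses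
instance (statuses : List String) (out : String) : Decidable (Spec_combine_verdicts statuses out) := by unfold Spec_combine_verdicts; infer_instance

-- ===== CLAIM (what is proved, stated in full; the proofs are below) =====
def Claim_equal_combine_verdicts : Prop := ∀ (statuses : List String), Dom_combine_verdicts statuses → Spec_combine_verdicts statuses (combine_verdicts statuses)

-- ===== LEMMAS AND PROOFS =====

def pvBest (l : List String) : Nat := l.foldl (fun b s => max b (pvRank s)) 0

theorem pvBest_acc (l : List String) (a : Nat) :
    l.foldl (fun b s => max b (pvRank s)) a = max a (pvBest l) := by
  induction l generalizing a with
  | nil => simp [pvBest]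
  | cons s t ih =>
      simp only [pvBest, List.foldl_cons] at *
      rw [ih, ih (max 0 (pvRank s))]
      omega

theorem pvBest_cons (s : String) (t : List String) :
    pvBest (s :: t) = max (pvRank s) (pvBest t) := by
  simp only [pvBest, List.foldl_cons]
  rw [pvBest_acc]
  unfold pvBest
  omega

theorem pvBest_le (l : List String) : pvBest l ≤ 3 := by
  induction l with
  | nil => simp [pvBest]
  | cons s t ih =>
      rw [pvBest_cons]
      have : pvRank s ≤ 3 := by unfold pvRank; split_ifs <;> omega
      omega

theorem pvBest_zero (l : List String) :
    pvBest l = 0 ↔ l.filter (fun status => status ≠ "skip") = [] := by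
  induction l with
  | nil => simp [pvBest]
  | cons s t ih =>
      rw [pvBest_cons, List.filter_cons]
      by_cases h : s = "skip"
      · simp [h, pvRank, ih]
      · have : pvRank s ≠ 0 := by unfold pvRank; split_ifs <;> simp_all
        simp [h]
        omega

theorem pvBest_three (l : List String) :
    pvBest l = 3 ↔ "fail" ∈ l := by
  induction l with
  | nil => simp [pvBest]
  | cons s t ih =>
      rw [pvBest_cons, List.mem_cons]
      have ht := pvBest_le t
      by_cases h : s = "fail"
      · simp [h, pvRank]
        omega
      · have : pvRank s ≤ 2 := by unfold pvRank; split_ifs <;> simp_all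
        constructor
        · intro he; right; rw [← ih]; omega
        · rintro (he | he)
          · exact absurd he.symm h
          · rw [← ih] at he; omega

theorem pvBest_two (l : List String) :
    pvBest l = 2 → "warn" ∈ l := by
  induction l with
  | nil => simp [pvBest]
  | cons s t ih =>
      rw [pvBest_cons, List.mem_cons]
      intro he
      by_cases h : s = "warn"
      · exact Or.inl h.symm
      · right
        apply ih
        have : pvRank s ≠ 2 := by unfold pvRank; split_ifs <;> simp_all
        have ht := pvBest_le t
        omega

theorem pvBest_warn_le (l : List String) : "warn" ∈ l → 2 ≤ pvBest l := by
  induction l with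
  | nil => simp
  | cons s t ih =>
      rw [pvBest_cons, List.mem_cons]
      rintro (h | h)
      · subst h; simp [pvRank]
      · have := ih h; omega

theorem mem_filter_ne_skip (l : List String) (x : String) (hx : x ≠ "skip") :
    x ∈ l.filter (fun status => status ≠ "skip") ↔ x ∈ l := by
  simp [List.mem_filter, hx]

-- ===== VERDICT (by name: the statement is the Claim_ definition above) =====
theorem combine_verdicts_spec : Claim_equal_combine_verdicts := by
  intro statuses _
  unfold Spec_combine_verdicts combine_verdicts combine_verdicts_alt
  simp only []
  have hle := pvBest_le statuses
  have h0 := pvBest_zero statuses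
  have h3 := pvBest_three statuses
  have hany : ∀ x : String, x ≠ "skip" →
      ((List.filter (fun status => status ≠ "skip") statuses).any (fun status => status == x) = true ↔ x ∈ statuses) := by
    intro x hx
    simp only [List.any_eq_true, beq_iff_eq]
    constructor
    · rintro ⟨y, hy, rfl⟩; exact (mem_filter_ne_skip _ _ hx).mp hy
    · intro h; exact ⟨x, (mem_filter_ne_skip _ _ hx).mpr h, rfl⟩
  have hfail := hany "fail" (by decide)
  have hwarn := hany "warn" (by decide)
  show (if List.filter (fun status => status ≠ "skip") statuses = [] then "skip"
      else if (List.filter (fun status => status ≠ "skip") statuses).any (fun status => status == "fail") then "fail"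
      else if (List.filter (fun status => status ≠ "skip") statuses).any (fun status => status == "warn") then "warn"
      else "ok")
    = (if pvBest statuses = 0 then "skip" else if pvBest statuses = 1 then "ok" else if pvBest statuses = 2 then "warn" else "fail")
  have hb4 : pvBest statuses = 0 ∨ pvBest statuses = 1 ∨ pvBest statuses = 2 ∨ pvBest statuses = 3 := by omega
  rcases hb4 with hb | hb | hb | hb
  · -- all skip
    rw [hb, if_pos (h0.mp hb)]
    simp
  · -- best = 1: no fail, no warn, filter nonempty
    have hne : List.filter (fun status => status ≠ "skip") statuses ≠ [] :=
      fun h => by have := h0.mpr h; omega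
    have hf : ¬ (List.filter (fun status => status ≠ "skip") statuses).any (fun status => status == "fail") = true :=
      fun h => by have := h3.mpr (hfail.mp h); omega
    have hw : ¬ (List.filter (fun status => status ≠ "skip") statuses).any (fun status => status == "warn") = true :=
      fun h => by have := pvBest_warn_le statuses (hwarn.mp h); omega
    rw [hb, if_neg hne, if_neg hf, if_neg hw]
    simp
  · -- best = 2: warn present, no fail
    have hwm : "warn" ∈ statuses := pvBest_two statuses hb
    have hne : List.filter (fun status => status ≠ "skip") statuses ≠ [] :=
      fun h => by have := h0.mpr h; omega
    have hf : ¬ (List.filter (fun status => status ≠ "skip") statuses).any (fun status => status == "fail") = true :=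
      fun h => by have := h3.mpr (hfail.mp h); omega
    rw [hb, if_neg hne, if_neg hf, if_pos (hwarn.mpr hwm)]
    simp
  · -- best = 3: fail present
    have hfm : "fail" ∈ statuses := h3.mp hb
    have hne : List.filter (fun status => status ≠ "skip") statuses ≠ [] :=
      List.ne_nil_of_mem ((mem_filter_ne_skip statuses "fail" (by decide)).mpr hfm)
    rw [hb, if_neg hne, if_pos (hfail.mpr hfm)]
    simp
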